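-- pv_equiv track=rewrite | github.com/nineyards-robotics/conda-ros | pipeline/build_config.py | _strip_top_level_blocks
-- ===== SOURCE A (Python) =====
-- from typing import Any, Iterable
--
-- def _strip_top_level_blocks(raw: str, keys: Iterable[str]) -> str:
--     """Drop the named top-level keys and their bodies from ``raw``.
--
--     Matches a line starting with ``{key}:`` at column 0 and skips
--     every subsequent indented or blank line until the next non-blank
--     line at column 0.  That next line is then itself re-evaluated —
--     so back-to-back drop blocks (e.g. ``channel_sources`` immediately
--     followed by ``channel_targets``) are both removed.
--     """
--     drop = tuple(f"{k}:" for k in keys)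
--     out: list[str] = []
--     dropping = False
--     for line in raw.splitlines():
--         if dropping:
--             if not line or line[0].isspace():
--                 continue
--             dropping = False  # fall through — re-check this new line
--         if any(line.startswith(prefix) for prefix in drop):
--             dropping = True
--             continue
--         out.append(line)
--     tail = "\n" if raw.endswith("\n") else ""
--     return "\n".join(out) + tail
-- ===== SOURCE B (Python) =====
-- def _strip_top_level_blocks(raw, keys):
--     """Group lines into top-level blocks, then keep the blocks whose
--     first line does not start with any ``{key}:`` prefix."""
--     drop = tuple(f"{k}:" for k in keys)
--     blocks = []
--     for line in raw.splitlines():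
--         if line and not line[0].isspace():
--             blocks.append([line])          # column-0 header starts a block
--         elif blocks:
--             blocks[-1].append(line)        # blank/indented continuation
--         else:
--             blocks.append([line])          # orphan leading lines: headerless block
--     kept = [ln for b in blocks if not any(b[0].startswith(p) for p in drop) for ln in b]
--     tail = "\n" if raw.endswith("\n") else ""
--     return "\n".join(kept) + tail
-- ===== Notes on version B (the rewrite author's own statement) =====
-- stated objective: alternative
-- what changed: B replaces A's single-pass scanner with a 'dropping' flag by a group-then-filter decomposition: one pass splits the lines into top-level blocks (a new block at each non-blank column-0 line), a second pass keeps whole blocks whose header matches no key prefix.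
-- outside the precondition, e.g. on _strip_top_level_blocks('a\n :x\nb\n', [' ']): A returns 'a\nb\n', B returns 'a\n :x\nb\n'
import Mathlib
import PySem

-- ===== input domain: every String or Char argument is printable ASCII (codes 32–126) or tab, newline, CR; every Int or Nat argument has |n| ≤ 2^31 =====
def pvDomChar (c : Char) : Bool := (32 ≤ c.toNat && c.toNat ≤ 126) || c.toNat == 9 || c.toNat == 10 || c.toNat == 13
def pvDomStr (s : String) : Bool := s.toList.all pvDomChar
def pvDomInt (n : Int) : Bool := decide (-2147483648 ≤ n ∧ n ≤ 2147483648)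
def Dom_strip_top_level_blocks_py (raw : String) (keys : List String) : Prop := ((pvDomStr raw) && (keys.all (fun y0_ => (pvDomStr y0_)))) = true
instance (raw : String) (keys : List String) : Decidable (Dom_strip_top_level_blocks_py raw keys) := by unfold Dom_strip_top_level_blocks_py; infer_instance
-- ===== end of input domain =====

-- B restructures A's single-pass scanner with a `dropping` flag into group-into-blocks-then-filter
-- (objective: alternative decomposition, same cost).

-- shared helper mirroring the Python test `not line or line[0].isspace()` (a blank or indented line)
def pvContLine (line : String) : Bool :=
  match line.toList with
  | [] => true
  | c :: _ => PySem.Chars.isspace c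

-- shared helper mirroring `any(line.startswith(prefix) for prefix in drop)`
def pvMatch (drop : List String) (line : String) : Bool :=
  drop.any (fun p => PySem.Str.startswith line p)

-- ===== PORT A =====
def strip_top_level_blocks_py (raw : String) (keys : List String) : String :=
  let drop := keys.map (fun k => k ++ ":")
  let st := (PySem.Str.splitlines raw).foldl
    (fun (s : List String × Bool) line =>
      if s.2 && pvContLine line then s                 -- dropping: skip blank/indented line
      else if pvMatch drop line then (s.1, true)       -- start dropping, skip this line
      else (s.1 ++ [line], false))                     -- out.append(line)
    (([] : List String), false)
  let tail := if PySem.Str.endswith raw "\n" then "\n" else ""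
  PySem.Str.join "\n" st.1 ++ tail

-- ===== PORT B =====
def strip_top_level_blocks_py_alt (raw : String) (keys : List String) : String :=
  let drop := keys.map (fun k => k ++ ":")
  -- blocks as in Source B; built head-first (the functional form of append-to-last), then reversed
  let blocks := ((PySem.Str.splitlines raw).foldl
    (fun (acc : List (List String)) line =>
      if pvContLine line = false then [line] :: acc    -- column-0 header starts a new block
      else match acc with
        | [] => [[line]]                               -- orphan leading blank/indented lines
        | b :: rest => (b ++ [line]) :: rest)          -- continuation appended to last block
    []).reverse
  -- keep blocks whose first line (b[0]; blocks are never empty, headD "" is its total form) matches no prefix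
  let kept := (blocks.filter (fun b => !(pvMatch drop (b.headD "")))).flatten
  let tail := if PySem.Str.endswith raw "\n" then "\n" else ""
  PySem.Str.join "\n" kept ++ tail

-- ===== PRECONDITION & SPEC =====
-- Pre_ excludes inputs where some blank/indented line of raw starts with a drop prefix "{key}:" (only
-- possible for keys starting with whitespace, or an empty prefix match) — a degenerate corner where A,
-- contrary to its docstring's "at column 0", also matches indented continuation lines while B matches
-- only column-0 block headers; both readings are defensible and neither is specified.
def Pre_strip_top_level_blocks_py (raw : String) (keys : List String) : Prop :=
  ∀ k ∈ keys, ∀ line ∈ PySem.Str.splitlines raw,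
    pvContLine line = true → PySem.Str.startswith line (k ++ ":") = false
instance (raw : String) (keys : List String) : Decidable (Pre_strip_top_level_blocks_py raw keys) := by
  unfold Pre_strip_top_level_blocks_py; infer_instance

def pvWitness_strip_top_level_blocks_py : String × List String :=
  ("a:\n  x\n\nb: 1\n", ["a"])

def Spec_strip_top_level_blocks_py (raw : String) (keys : List String) (out : String) : Prop :=
  out = strip_top_level_blocks_py_alt raw keys
instance (raw : String) (keys : List String) (out : String) : Decidable (Spec_strip_top_level_blocks_py raw keys out) := by
  unfold Spec_strip_top_level_blocks_py; infer_instance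

-- ===== CLAIM (what is proved, stated in full; the proofs are below) =====
def Claim_equal_strip_top_level_blocks_py : Prop :=
  ∀ (raw : String) (keys : List String), Dom_strip_top_level_blocks_py raw keys →
    Pre_strip_top_level_blocks_py raw keys →
    Spec_strip_top_level_blocks_py raw keys (strip_top_level_blocks_py raw keys)

-- ===== LEMMAS AND PROOFS =====

-- named forms of the two fold steps (definitionally equal to the ports' lambdas)
def pvAStep (drop : List String) : List String × Bool → String → List String × Bool :=
  fun s line =>
    if s.2 && pvContLine line then s
    else if pvMatch drop line then (s.1, true)
    else (s.1 ++ [line], false)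

def pvBStep : List (List String) → String → List (List String) :=
  fun acc line =>
    if pvContLine line = false then [line] :: acc
    else match acc with
      | [] => [[line]]
      | b :: rest => (b ++ [line]) :: rest

-- recursive description of A's scan: output lines and final flag, starting from flag d
def pvA (drop : List String) : Bool → List String → List String × Bool
  | d, [] => ([], d)
  | d, l :: ls =>
    if d && pvContLine l then pvA drop d ls
    else if pvMatch drop l then pvA drop true ls
    else let r := pvA drop false ls; (l :: r.1, r.2)

theorem pvA_foldl (drop : List String) (ls : List String) : ∀ (out : List String) (d : Bool),
    ls.foldl (pvAStep drop) (out, d)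
      = (out ++ (pvA drop d ls).1, (pvA drop d ls).2) := by
  induction ls with
  | nil => intro out d; simp [pvA]
  | cons l ls ih =>
    intro out d
    rw [List.foldl_cons]
    by_cases h1 : (d && pvContLine l) = true
    · rw [show pvAStep drop (out, d) l = (out, d) from by simp [pvAStep, h1],
        show pvA drop d (l :: ls) = pvA drop d ls from by simp only [pvA]; rw [if_pos h1]]
      exact ih out d
    · by_cases h2 : pvMatch drop l = true
      · rw [show pvAStep drop (out, d) l = (out, true) from by simp [pvAStep, h1, h2],
          show pvA drop d (l :: ls) = pvA drop true ls from by
            simp only [pvA]; rw [if_neg h1, if_pos h2]]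
        exact ih out true
      · rw [show pvAStep drop (out, d) l = (out ++ [l], false) from by simp [pvAStep, h1, h2],
          show pvA drop d (l :: ls)
              = (l :: (pvA drop false ls).1, (pvA drop false ls).2) from by
            simp only [pvA]; rw [if_neg h1, if_neg h2],
          ih]
        simp

-- blocks of B, described via takeWhile/dropWhile
def pvBlocks : List String → List (List String)
  | [] => []
  | l :: rest =>
    (l :: rest.takeWhile pvContLine) :: pvBlocks (rest.dropWhile pvContLine)
termination_by ls => ls.length
decreasing_by
  exact Nat.lt_succ_of_le (List.length_dropWhile_le _ _)

theorem pvB_foldl_cons (ls : List String) : ∀ (b : List String) (acc : List (List String)),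
    ls.foldl pvBStep (b :: acc)
      = (pvBlocks (ls.dropWhile pvContLine)).reverse
          ++ ((b ++ ls.takeWhile pvContLine) :: acc) := by
  induction ls with
  | nil => intro b acc; simp [pvBlocks]
  | cons l ls ih =>
    intro b acc
    by_cases h : pvContLine l = true
    · rw [List.foldl_cons, show pvBStep (b :: acc) l = (b ++ [l]) :: acc from by
        simp [pvBStep, h], ih, List.takeWhile_cons_of_pos h, List.dropWhile_cons_of_pos h]
      simp
    · have hb : pvContLine l = false := by simpa using h
      rw [List.foldl_cons, show pvBStep (b :: acc) l = [l] :: b :: acc from by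
        simp [pvBStep, hb], ih, List.takeWhile_cons_of_neg (by simp [hb]),
        List.dropWhile_cons_of_neg (by simp [hb])]
      simp only [pvBlocks, List.reverse_cons, List.append_assoc]
      simp

theorem pvB_foldl (ls : List String) :
    (ls.foldl pvBStep []).reverse = pvBlocks ls := by
  cases ls with
  | nil => simp [pvBlocks]
  | cons l ls =>
    have hstep : pvBStep [] l = [[l]] := by
      cases hc : pvContLine l <;> simp [pvBStep, hc]
    rw [List.foldl_cons, hstep, pvB_foldl_cons]
    simp only [pvBlocks, List.reverse_append, List.reverse_cons, List.reverse_reverse]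
    simp

-- the Pre_-derived fact: a blank/indented line of raw matches no drop prefix
theorem pvH_of_pre (raw : String) (keys : List String)
    (hpre : ∀ k ∈ keys, ∀ line ∈ PySem.Str.splitlines raw,
      pvContLine line = true → PySem.Str.startswith line (k ++ ":") = false) :
    ∀ l ∈ PySem.Str.splitlines raw, pvContLine l = true →
      pvMatch (keys.map (fun k => k ++ ":")) l = false := by
  intro l hl hcont
  rw [pvMatch, List.any_map, List.any_eq_false]
  intro k hk
  simp only [Function.comp]
  have h := hpre k hk l hl hcont
  rw [PySem.Str.startswith_eq] at h
  simpa using h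

theorem pvA_cont_false (drop : List String) :
    ∀ (c : List String), (∀ l ∈ c, pvMatch drop l = false) → (∀ l ∈ c, pvContLine l = true) →
    ∀ (rest : List String),
    pvA drop false (c ++ rest) = (c ++ (pvA drop false rest).1, (pvA drop false rest).2) := by
  intro c
  induction c with
  | nil => intro _ _ rest; simp
  | cons x c ih =>
    intro hcm hc rest
    have hx : pvContLine x = true := hc x (List.mem_cons_self ..)
    have hm : pvMatch drop x = false := hcm x (List.mem_cons_self ..)
    simp [pvA, hm, ih (fun l hl => hcm l (List.mem_cons_of_mem _ hl))
      (fun l hl => hc l (List.mem_cons_of_mem _ hl)) rest]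

theorem pvA_cont_true (drop : List String) :
    ∀ (c : List String), (∀ l ∈ c, pvContLine l = true) → ∀ (rest : List String),
    pvA drop true (c ++ rest) = pvA drop true rest := by
  intro c
  induction c with
  | nil => intro _ rest; simp
  | cons x c ih =>
    intro hc rest
    have hx : pvContLine x = true := hc x (List.mem_cons_self ..)
    simp [pvA, hx, ih (fun l hl => hc l (List.mem_cons_of_mem _ hl)) rest]

theorem pvA_true_eq_false (drop : List String) (rest : List String)
    (h : ∀ r ∈ rest.head?, pvContLine r = false) :
    (pvA drop true rest).1 = (pvA drop false rest).1 := by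
  cases rest with
  | nil => simp [pvA]
  | cons r rs =>
    have hr : pvContLine r = false := h r (by simp)
    simp [pvA, hr]

theorem pvHead_dropWhile {α : Type} (p : α → Bool) :
    ∀ (xs : List α), ∀ r ∈ (xs.dropWhile p).head?, p r = false := by
  intro xs
  induction xs with
  | nil => simp
  | cons x xs ih =>
    by_cases hx : p x = true
    · rw [List.dropWhile_cons_of_pos hx]; exact ih
    · rw [List.dropWhile_cons_of_neg (by simpa using hx)]
      intro r hr
      simp only [List.head?_cons, Option.mem_def, Option.some.injEq] at hr
      rw [← hr]
      simpa using hx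

theorem pvKey (drop : List String) :
    ∀ (ls : List String), (∀ l ∈ ls, pvContLine l = true → pvMatch drop l = false) →
    (pvA drop false ls).1
      = ((pvBlocks ls).filter (fun b => !(pvMatch drop (b.headD "")))).flatten := by
  have main : ∀ (n : Nat) (ls : List String), ls.length ≤ n →
      (∀ l ∈ ls, pvContLine l = true → pvMatch drop l = false) →
      (pvA drop false ls).1
      = ((pvBlocks ls).filter (fun b => !(pvMatch drop (b.headD "")))).flatten := by
    intro n
    induction n with
    | zero =>
      intro ls hls _
      have : ls = [] := List.eq_nil_of_length_eq_zero (Nat.le_zero.mp hls)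
      subst this; simp [pvA, pvBlocks]
    | succ n ihn =>
      intro ls hls H
      cases ls with
      | nil => simp [pvA, pvBlocks]
      | cons l rest =>
        have Hrest : ∀ x ∈ rest, pvContLine x = true → pvMatch drop x = false :=
          fun x hx => H x (List.mem_cons_of_mem _ hx)
        have Hdrop : ∀ x ∈ rest.dropWhile pvContLine, pvContLine x = true → pvMatch drop x = false :=
          fun x hx => Hrest x ((List.dropWhile_sublist _).mem hx)
        have hcm : ∀ x ∈ rest.takeWhile pvContLine, pvMatch drop x = false :=
          fun x hx => Hrest x ((List.takeWhile_sublist _).mem hx) (List.mem_takeWhile_imp hx)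
        have hcr : rest.takeWhile pvContLine ++ rest.dropWhile pvContLine = rest :=
          List.takeWhile_append_dropWhile
        have hrs_len : (rest.dropWhile pvContLine).length ≤ n :=
          le_trans (List.length_dropWhile_le _ _) (Nat.le_of_succ_le_succ (by simpa using hls))
        have hc : ∀ x ∈ rest.takeWhile pvContLine, pvContLine x = true :=
          fun x hx => List.mem_takeWhile_imp hx
        have hrshead := pvHead_dropWhile pvContLine rest
        have hsplitF : (pvA drop false rest).1
            = rest.takeWhile pvContLine ++ (pvA drop false (rest.dropWhile pvContLine)).1 := by
          conv_lhs => rw [← hcr]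
          rw [pvA_cont_false drop _ hcm hc _]
        have hsplitT : pvA drop true rest = pvA drop true (rest.dropWhile pvContLine) := by
          conv_lhs => rw [← hcr]
          rw [pvA_cont_true drop _ hc _]
        rw [show pvBlocks (l :: rest)
            = (l :: rest.takeWhile pvContLine) :: pvBlocks (rest.dropWhile pvContLine) from by
          simp only [pvBlocks]]
        by_cases hcl : pvContLine l = true
        · have hml : pvMatch drop l = false := H l (List.mem_cons_self ..) hcl
          rw [show (pvA drop false (l :: rest)).1 = l :: (pvA drop false rest).1 from by
            simp [pvA, hml],
            hsplitF, List.filter_cons_of_pos (by simp [hml])]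
          simp [ihn _ hrs_len Hdrop]
        · by_cases hml : pvMatch drop l = true
          · rw [show (pvA drop false (l :: rest)).1 = (pvA drop true rest).1 from by
              simp [pvA, hml],
              hsplitT, pvA_true_eq_false drop _ hrshead,
              List.filter_cons_of_neg (by simp [hml])]
            exact ihn _ hrs_len Hdrop
          · have hml' : pvMatch drop l = false := by simpa using hml
            rw [show (pvA drop false (l :: rest)).1 = l :: (pvA drop false rest).1 from by
              simp [pvA, hml'],
              hsplitF, List.filter_cons_of_pos (by simp [hml'])]
            simp [ihn _ hrs_len Hdrop]
  exact fun ls => main ls.length ls le_rfl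

-- ===== VERDICT (by name: the statement is the Claim_ definition above) =====
theorem strip_top_level_blocks_py_spec : Claim_equal_strip_top_level_blocks_py := by
  intro raw keys _ hpre
  unfold Pre_strip_top_level_blocks_py at hpre
  unfold Spec_strip_top_level_blocks_py
  simp only [strip_top_level_blocks_py, strip_top_level_blocks_py_alt]
  rw [show (fun (s : List String × Bool) line =>
        if s.2 && pvContLine line then s
        else if pvMatch (keys.map (fun k => k ++ ":")) line then (s.1, true)
        else (s.1 ++ [line], false)) = pvAStep (keys.map (fun k => k ++ ":")) from rfl,
    show (fun (acc : List (List String)) line =>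
        if pvContLine line = false then [line] :: acc
        else match acc with
          | [] => [[line]]
          | b :: rest => (b ++ [line]) :: rest) = pvBStep from rfl,
    pvA_foldl, pvB_foldl]
  rw [pvKey (keys.map (fun k => k ++ ":")) _ (pvH_of_pre raw keys hpre)]
  simp
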